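-- pv_equiv track=rewrite | github.com/datapointchris/ichrisbirch | stats/hooks/ruff_format.py | _parse_format_output
-- ===== SOURCE A (Python) =====
-- def _parse_format_output(output: str) -> list[str]:
--     """Parse ruff format --check output for files that would be reformatted.
--
--     Output lines look like: "Would reformat: path/to/file.py"
--     """
--     reformatted: list[str] = []
--
--     for line in output.split('\n'):
--         line = line.strip()
--         if line.startswith('Would reformat:'):
--             path = line.removeprefix('Would reformat:').strip()
--             if path:
--                 reformatted.append(path)
--
--     return reformatted
-- ===== SOURCE B (Python) =====
-- def _parse_format_output(output: str) -> list[str]: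
--     """Single streaming pass over the characters with a tiny state machine:
--     no split(), no per-line strip()/startswith()/removeprefix()."""
--     prefix = 'Would reformat:'
--     results = []
--     mode = 0   # 0 = skipping leading blanks, 1 = matching the prefix, 2 = collecting the path, 3 = dead line
--     pos = 0    # next prefix character to match (mode 1)
--     buf = []   # path collected so far, trailing blanks withheld
--     pend = []  # pending run of blanks inside/after the path
--     for ch in output + '\n':   # sentinel newline finishes the last line
--         if ch == '\n':
--             if mode == 2 and buf:
--                 results.append(''.join(buf))
--             mode, pos, buf, pend = 0, 0, [], []
--         elif mode == 3:
--             pass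
--         elif mode == 0:
--             if ch in ' \t\r':
--                 pass
--             elif ch == prefix[0]:
--                 mode, pos = 1, 1
--             else:
--                 mode = 3
--         elif mode == 1:
--             if ch == prefix[pos]:
--                 pos += 1
--                 if pos == len(prefix):
--                     mode = 2
--             else:
--                 mode = 3
--         else:
--             if ch in ' \t\r':
--                 pend.append(ch)
--             else:
--                 if buf:
--                     buf.extend(pend)
--                 pend = []
--                 buf.append(ch)
--     return results
-- ===== Notes on version B (the rewrite author's own statement) =====
-- stated objective: alternative
-- what changed: Replaces the per-line split/strip/startswith/removeprefix pipeline with a single streaming pass over the characters driven by a four-state machine (skip leading blanks, match the prefix, collect the path with trailing blanks withheld, dead line), emitting a path at each line end; same O(n) cost, different traversal and data maintained.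
import Mathlib
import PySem

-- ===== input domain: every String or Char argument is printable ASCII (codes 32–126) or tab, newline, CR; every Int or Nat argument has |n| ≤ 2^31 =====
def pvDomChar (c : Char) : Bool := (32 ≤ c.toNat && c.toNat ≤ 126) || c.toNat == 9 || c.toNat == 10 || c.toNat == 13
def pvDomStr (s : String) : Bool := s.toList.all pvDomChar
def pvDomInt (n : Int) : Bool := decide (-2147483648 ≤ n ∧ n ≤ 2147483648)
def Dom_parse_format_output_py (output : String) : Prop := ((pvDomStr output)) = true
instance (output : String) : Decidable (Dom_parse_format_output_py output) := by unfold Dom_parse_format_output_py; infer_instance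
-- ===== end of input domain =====

-- B replaces A's split/strip/startswith per-line pipeline by one streaming character pass with a
-- small state machine (objective: alternative structure, same O(n) cost; return value only).

-- ===== PORT A =====
-- str.removeprefix, exact
def pvRemoveprefix (s p : List Char) : List Char := if p.isPrefixOf s then s.drop p.length else s

def parse_format_output_py (output : String) : List String :=
  (PySem.Chars.splitOn output.toList "\n".toList).foldl
    (fun reformatted line =>
      let l := PySem.Chars.strip line
      if PySem.Chars.startswith l "Would reformat:".toList then
        let path := PySem.Chars.strip (pvRemoveprefix l "Would reformat:".toList)
        if path ≠ [] then reformatted ++ [String.ofList path] else reformatted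
      else reformatted)
    []

-- ===== PORT B =====
def pvPrefix : List Char := "Would reformat:".toList

-- ch in ' \t\r'
def pvWs (c : Char) : Bool := c == ' ' || c == '\t' || c == '\r'

-- one iteration of Source B's loop; state = (results, mode, pos, buf, pend), modes 0 skip-blanks,
-- 1 matching the prefix, 2 collecting the path, 3 dead line.  prefix[pos] is ported as pyGet?
-- (in mode 1 the machine keeps 1 ≤ pos ≤ 14, so the Python indexing never raises).
def pvStep (s : List String × Int × Int × List Char × List Char) (ch : Char) :
    List String × Int × Int × List Char × List Char :=
  match s with
  | (results, mode, pos, buf, pend) =>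
    if ch = '\n' then
      (if mode = 2 ∧ buf ≠ [] then results ++ [String.ofList buf] else results, 0, 0, [], [])
    else if mode = 3 then (results, mode, pos, buf, pend)
    else if mode = 0 then
      if pvWs ch then (results, mode, pos, buf, pend)
      else if PySem.List.pyGet? pvPrefix 0 = some ch then (results, 1, 1, buf, pend)
      else (results, 3, pos, buf, pend)
    else if mode = 1 then
      if PySem.List.pyGet? pvPrefix pos = some ch then
        if pos + 1 = 15 then (results, 2, pos + 1, buf, pend)
        else (results, 1, pos + 1, buf, pend)
      else (results, 3, pos, buf, pend)
    else
      if pvWs ch then (results, mode, pos, buf, pend ++ [ch])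
      else (results, mode, pos, (if buf ≠ [] then buf ++ pend else []) ++ [ch], [])

def parse_format_output_py_alt (output : String) : List String :=
  (List.foldl pvStep ([], 0, 0, [], []) (output.toList ++ ['\n'])).1

-- ===== PRECONDITION & SPEC =====
def Spec_parse_format_output_py (output : String) (out : List String) : Prop := out = parse_format_output_py_alt output
instance (output : String) (out : List String) : Decidable (Spec_parse_format_output_py output out) := by unfold Spec_parse_format_output_py; infer_instance

-- ===== CLAIM (what is proved, stated in full; the proofs are below) =====
def Claim_equal_parse_format_output_py : Prop := ∀ (output : String), Dom_parse_format_output_py output → Spec_parse_format_output_py output (parse_format_output_py output)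

-- ===== LEMMAS AND PROOFS =====

-- proof-side model of output.split('\n')
def pvSplitNL (pre : List Char) : List Char → List (List Char)
  | [] => [pre]
  | c :: rest => if c = '\n' then pre :: pvSplitNL [] rest else pvSplitNL (pre ++ [c]) rest

-- trailing [ \t\r] stripped
def pvRstrip (l : List Char) : List Char := (l.reverse.dropWhile pvWs).reverse

-- basic char facts
theorem pvWs_ne_nl {c : Char} (h : pvWs c = true) : c ≠ '\n' := by
  rintro rfl; simp [pvWs] at h

theorem pv_dropWhile_congr {p q : Char → Bool} : ∀ {l : List Char}, (∀ x ∈ l, p x = q x) → l.dropWhile p = l.dropWhile q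
  | [], _ => rfl
  | c :: l, h => by
    have hc := h c (by simp)
    have ih := pv_dropWhile_congr (p := p) (q := q) (l := l) fun x hx => h x (List.mem_cons_of_mem _ hx)
    by_cases hp : p c = true <;> simp [hp, hc ▸ hp, ih]

theorem pvRstrip_suffix (l : List Char) : pvRstrip l <+: l := by
  have h := (List.reverse_prefix (l₁ := List.dropWhile pvWs l.reverse) (l₂ := l.reverse)).mpr (List.dropWhile_suffix pvWs)
  simpa [pvRstrip] using h

theorem pvRstrip_eq_nil {l : List Char} (h : ∀ c ∈ l, pvWs c = true) : pvRstrip l = [] := by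
  simp [pvRstrip, List.dropWhile_eq_nil_iff]
  intro x hx; exact h x (by simpa using hx)

theorem pvRstrip_append_ws {x w : List Char} (h : ∀ c ∈ w, pvWs c = true) : pvRstrip (x ++ w) = pvRstrip x := by
  simp only [pvRstrip, List.reverse_append, List.dropWhile_append]
  have : w.reverse.dropWhile pvWs = [] := by
    simp [List.dropWhile_eq_nil_iff]; intro c hc; exact h c (by simpa using hc)
  simp [this]

theorem pvRstrip_append_mid {x y : List Char} {c : Char} (hc : pvWs c = false) :
    pvRstrip (x ++ c :: y) = x ++ c :: pvRstrip y := by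
  have h1 : List.dropWhile pvWs (y.reverse ++ [c]) = List.dropWhile pvWs y.reverse ++ [c] := by
    rw [List.dropWhile_append]
    by_cases hy : (List.dropWhile pvWs y.reverse).isEmpty
    · simp_all [List.isEmpty_iff, List.dropWhile_cons, hc]
    · simp [hy]
  have h2 : (x ++ c :: y).reverse = (y.reverse ++ [c]) ++ x.reverse := by simp
  rw [pvRstrip, h2, List.dropWhile_append, h1]
  simp [pvRstrip]

theorem pvRstrip_decomp (t : List Char) : pvRstrip t ++ (t.reverse.takeWhile pvWs).reverse = t := by
  rw [pvRstrip, ← List.reverse_append, List.takeWhile_append_dropWhile, List.reverse_reverse]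

theorem pvRstrip_decomp_ws (t : List Char) : ∀ c ∈ (t.reverse.takeWhile pvWs).reverse, pvWs c = true := by
  intro c hc; exact List.mem_takeWhile_imp (by simpa using hc)

theorem pvRstrip_lstrip (t : List Char) :
    pvRstrip ((pvRstrip t).dropWhile pvWs) = pvRstrip (t.dropWhile pvWs) := by
  have hw := pvRstrip_decomp_ws t
  have hd := pvRstrip_decomp t
  conv_rhs => rw [← hd]
  rw [List.dropWhile_append]
  by_cases h : ((pvRstrip t).dropWhile pvWs).isEmpty
  · have h1 : (pvRstrip t).dropWhile pvWs = [] := by simpa [List.isEmpty_iff] using h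
    have h2 : ((t.reverse.takeWhile pvWs).reverse).dropWhile pvWs = [] :=
      List.dropWhile_eq_nil_iff.mpr (by intro x hx; exact hw x hx)
    rw [if_pos h, h2, h1]
  · rw [if_neg h, pvRstrip_append_ws hw]

theorem pvPrefix_split : pvPrefix = "Would reformat".toList ++ ':' :: [] := by decide

theorem pvRstrip_prefix_append (tail : List Char) :
    pvRstrip (pvPrefix ++ tail) = pvPrefix ++ pvRstrip tail := by
  have h : pvPrefix ++ tail = "Would reformat".toList ++ ':' :: tail := by
    rw [pvPrefix_split]; simp
  rw [h, pvRstrip_append_mid (by decide), pvPrefix_split]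
  simp

theorem prefix_rstrip_iff (t : List Char) : pvPrefix <+: pvRstrip t ↔ pvPrefix <+: t := by
  constructor
  · intro h; exact h.trans (pvRstrip_suffix t)
  · rintro ⟨tail, rfl⟩
    rw [pvRstrip_prefix_append]
    exact List.prefix_append _ _

theorem pvSplitNL_ne_nil (pre l) : pvSplitNL pre l ≠ [] := by
  induction l generalizing pre with
  | nil => simp [pvSplitNL]
  | cons c rest ih => by_cases h : c = '\n' <;> simp [pvSplitNL, h, ih]

theorem pvSplitOn_go_eq (fuel : Nat) : ∀ (l cur : List Char) (acc : List (List Char)),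
    l.length < fuel →
    PySem.Chars.splitOn.go ['\n'] fuel l cur acc = acc.reverse ++ pvSplitNL cur.reverse l := by
  induction fuel with
  | zero => intro l cur acc h; omega
  | succ fuel ih =>
    intro l cur acc h
    match l with
    | [] => simp [PySem.Chars.splitOn.go, pvSplitNL]
    | c :: rest =>
      by_cases hc : c = '\n'
      · subst hc
        rw [PySem.Chars.splitOn.go]
        have hpre : List.isPrefixOf ['\n'] ('\n' :: rest) = true := by
          simp [List.isPrefixOf]
        rw [if_pos hpre]
        have : rest.length < fuel := by simp at h; omega
        rw [ih _ _ _ (by simpa using this)]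
        simp [pvSplitNL]
      · rw [PySem.Chars.splitOn.go]
        have hpre : List.isPrefixOf ['\n'] (c :: rest) = false := by
          simp [List.isPrefixOf]; exact fun hh => (hc hh.symm).elim
        rw [if_neg (by simp [hpre])]
        have : rest.length < fuel := by simp at h; omega
        rw [ih _ _ _ this]
        simp [pvSplitNL, hc]

theorem pvSplitOn_eq (cs : List Char) :
    PySem.Chars.splitOn cs ['\n'] = pvSplitNL [] cs := by
  rw [PySem.Chars.splitOn, pvSplitOn_go_eq (cs.length + 1) cs [] [] (by omega)]
  rfl

theorem pvSplitNL_mem : ∀ (l pre : List Char), ∀ p ∈ pvSplitNL pre l, ∀ c ∈ p, c ∈ pre ∨ (c ∈ l ∧ c ≠ '\n')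
  | [], pre => by simp [pvSplitNL]
  | c :: rest, pre => by
    by_cases hc : c = '\n'
    · subst hc
      simp only [pvSplitNL, if_pos rfl]
      intro p hp x hx
      rcases List.mem_cons.mp hp with rfl | hp
      · exact Or.inl hx
      · rcases pvSplitNL_mem rest [] p hp x hx with h | ⟨h1, h2⟩
        · simp at h
        · exact Or.inr ⟨List.mem_cons_of_mem _ h1, h2⟩
    · simp only [pvSplitNL, if_neg hc]
      intro p hp x hx
      rcases pvSplitNL_mem rest (pre ++ [c]) p hp x hx with h | ⟨h1, h2⟩
      · rcases List.mem_append.mp h with h | h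
        · exact Or.inl h
        · simp at h; subst h; exact Or.inr ⟨by simp, hc⟩
      · exact Or.inr ⟨List.mem_cons_of_mem _ h1, h2⟩

def pvGlue : List (List Char) → List Char
  | [] => []
  | [p] => p ++ ['\n']
  | p :: q :: r => p ++ '\n' :: pvGlue (q :: r)

theorem pvGlue_cons (p : List Char) {s : List (List Char)} (h : s ≠ []) :
    pvGlue (p :: s) = p ++ '\n' :: pvGlue s := by
  cases s with
  | nil => exact absurd rfl h
  | cons q r => rfl

theorem pvGlue_splitNL : ∀ (l pre : List Char), pvGlue (pvSplitNL pre l) = pre ++ l ++ ['\n']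
  | [], pre => by simp [pvSplitNL, pvGlue]
  | c :: rest, pre => by
    by_cases hc : c = '\n'
    · subst hc
      rw [pvSplitNL, if_pos rfl, pvGlue_cons _ (pvSplitNL_ne_nil _ _), pvGlue_splitNL rest []]
      simp
    · rw [pvSplitNL, if_neg hc, pvGlue_splitNL rest (pre ++ [c])]
      simp

-- M1: blanks keep the fresh state
theorem pv_ws_run : ∀ (w : List Char), (∀ c ∈ w, pvWs c = true) → ∀ acc,
    List.foldl pvStep (acc, 0, 0, [], []) w = (acc, 0, 0, [], [])
  | [], _, acc => rfl
  | c :: w, h, acc => by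
    have hc := h c (by simp)
    have hne := pvWs_ne_nl hc
    rw [List.foldl_cons, show pvStep (acc, 0, 0, [], []) c = (acc, 0, 0, [], []) from by
      simp [pvStep, hne, hc]]
    exact pv_ws_run w (fun x hx => h x (by simp [hx])) acc

theorem pvStep_ne_nl (acc : List String) (st : Int × Int × List Char × List Char) (ch : Char) (h : ch ≠ '\n') :
    pvStep (acc, st) ch = (acc, (pvStep ([], st) ch).2) := by
  obtain ⟨mode, pos, buf, pend⟩ := st
  simp only [pvStep, if_neg h]
  split_ifs <;> rfl

theorem pv_run_acc : ∀ (r : List Char), '\n' ∉ r → ∀ (acc : List String) (st : Int × Int × List Char × List Char),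
    List.foldl pvStep (acc, st) r = (acc, (List.foldl pvStep ([], st) r).2)
  | [], _, acc, st => rfl
  | c :: r, h, acc, st => by
    have hc : c ≠ '\n' := by rintro rfl; exact h (by simp)
    have hr : '\n' ∉ r := fun hx => h (by simp [hx])
    rw [List.foldl_cons, List.foldl_cons, pvStep_ne_nl acc st c hc, pvStep_ne_nl [] st c hc,
        pv_run_acc r hr acc _, pv_run_acc r hr [] _]

theorem pv_prefix_run (acc : List String) :
    List.foldl pvStep (acc, 0, 0, [], []) pvPrefix = (acc, 2, 15, [], []) := by
  rw [pv_run_acc pvPrefix (by decide) acc _]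
  rw [show List.foldl pvStep ([], 0, 0, [], []) pvPrefix = ([], 2, 15, [], []) from by decide]

-- M3: dead absorbs until newline
theorem pv_dead_run : ∀ (r : List Char), '\n' ∉ r → ∀ acc (pos : Int) buf pend,
    List.foldl pvStep (acc, 3, pos, buf, pend) r = (acc, 3, pos, buf, pend)
  | [], _, acc, pos, buf, pend => rfl
  | c :: r, h, acc, pos, buf, pend => by
    have hc : c ≠ '\n' := by rintro rfl; exact h (by simp)
    rw [List.foldl_cons, show pvStep (acc, 3, pos, buf, pend) c = (acc, 3, pos, buf, pend) from by
      simp [pvStep, hc]]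
    exact pv_dead_run r (fun hx => h (by simp [hx])) acc pos buf pend

def pvPathRun (buf pend : List Char) : List Char → List Char × List Char
  | [] => (buf, pend)
  | c :: r =>
    if pvWs c then pvPathRun buf (pend ++ [c]) r
    else pvPathRun ((if buf ≠ [] then buf ++ pend else []) ++ [c]) [] r

-- M4: path mode runs pvPathRun
theorem pv_path_run : ∀ (r : List Char), '\n' ∉ r → ∀ acc (pos : Int) buf pend,
    List.foldl pvStep (acc, 2, pos, buf, pend) r
      = (acc, 2, pos, (pvPathRun buf pend r).1, (pvPathRun buf pend r).2)
  | [], _, acc, pos, buf, pend => rfl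
  | c :: r, h, acc, pos, buf, pend => by
    have hc : c ≠ '\n' := by rintro rfl; exact h (by simp)
    have hr : '\n' ∉ r := fun hx => h (by simp [hx])
    by_cases hw : pvWs c
    · rw [List.foldl_cons, show pvStep (acc, 2, pos, buf, pend) c = (acc, 2, pos, buf, pend ++ [c]) from by
        simp [pvStep, hc, hw]]
      rw [pv_path_run r hr acc pos buf (pend ++ [c])]
      simp [pvPathRun, hw]
    · rw [List.foldl_cons, show pvStep (acc, 2, pos, buf, pend) c
          = (acc, 2, pos, (if buf ≠ [] then buf ++ pend else []) ++ [c], []) from by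
        simp [pvStep, hc, hw]]
      rw [pv_path_run r hr acc pos _ []]
      simp [pvPathRun, hw]

-- M5/M6: value of pvPathRun
theorem pvPathRun_fst_ne : ∀ (r buf pend : List Char), buf ≠ [] → (∀ c ∈ pend, pvWs c = true) →
    (pvPathRun buf pend r).1 = buf ++ pvRstrip (pend ++ r)
  | [], buf, pend, hb, hp => by
    rw [pvPathRun]
    simp [pvRstrip_eq_nil (by simpa using hp)]
  | c :: r, buf, pend, hb, hp => by
    by_cases hw : pvWs c
    · rw [pvPathRun, if_pos hw, pvPathRun_fst_ne r buf (pend ++ [c]) hb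
        (by intro x hx; rcases List.mem_append.mp hx with h | h; exact hp x h; simp at h; subst h; exact hw)]
      simp
    · rw [pvPathRun, if_neg hw, pvPathRun_fst_ne r _ [] (by simp) (by simp)]
      rw [if_pos hb]
      have : pend ++ c :: r = pend ++ c :: r := rfl
      rw [show pvRstrip (pend ++ c :: r) = pend ++ c :: pvRstrip r from
        pvRstrip_append_mid (by simpa using hw)]
      simp

theorem pvPathRun_fst_nil : ∀ (r pend : List Char), (∀ c ∈ pend, pvWs c = true) →
    (pvPathRun [] pend r).1 = pvRstrip (r.dropWhile pvWs)
  | [], pend, hp => by rw [pvPathRun]; simp [pvRstrip]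
  | c :: r, pend, hp => by
    by_cases hw : pvWs c
    · rw [pvPathRun, if_pos hw, pvPathRun_fst_nil r (pend ++ [c])
        (by intro x hx; rcases List.mem_append.mp hx with h | h; exact hp x h; simp at h; subst h; exact hw)]
      simp [hw]
    · rw [pvPathRun, if_neg hw]
      rw [show (if ([] : List Char) ≠ [] then ([] : List Char) ++ pend else []) = [] from by simp]
      rw [pvPathRun_fst_ne r ([] ++ [c]) [] (by simp) (by simp)]
      rw [List.dropWhile_cons_of_neg (by simpa using hw)]
      rw [show pvRstrip (c :: r) = [] ++ c :: pvRstrip r from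
        pvRstrip_append_mid (x := []) (y := r) (by simpa using hw)]
      simp

theorem pvPrefix_length : pvPrefix.length = 15 := by decide

-- M7: failing prefix match never reaches path mode
theorem pv_pre_run : ∀ (r : List Char), '\n' ∉ r → ∀ (k : Nat), 1 ≤ k → k ≤ 14 →
    ¬ (pvPrefix.drop k <+: r) → ∀ acc,
    (List.foldl pvStep (acc, 1, (k : Int), [], []) r).1 = acc ∧
    (List.foldl pvStep (acc, 1, (k : Int), [], []) r).2.1 ≠ 2
  | [], _, k, _, _, _, acc => by simp
  | c :: r, h, k, hk1, hk14, hnp, acc => by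
    have hc : c ≠ '\n' := by rintro rfl; exact h (by simp)
    have hr : '\n' ∉ r := fun hx => h (by simp [hx])
    have hklt : k < pvPrefix.length := by rw [pvPrefix_length]; omega
    have hget : PySem.List.pyGet? pvPrefix (k : Int) = some pvPrefix[k] := by
      rw [PySem.List.pyGet?_natCast]
      exact List.getElem?_eq_getElem hklt
    have hdropk : pvPrefix.drop k = pvPrefix[k] :: pvPrefix.drop (k + 1) :=
      List.drop_eq_getElem_cons hklt
    by_cases hceq : pvPrefix[k] = c
    · have hnp' : ¬ (pvPrefix.drop (k + 1) <+: r) := by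
        intro hp
        exact hnp (by rw [hdropk, hceq]; exact List.cons_prefix_cons.mpr ⟨rfl, hp⟩)
      have hk14' : k ≠ 14 := by
        rintro rfl
        exact hnp' (by rw [show pvPrefix.drop 15 = [] from by decide]; exact List.nil_prefix)
      have hstep : pvStep (acc, 1, (k : Int), [], []) c = (acc, 1, ((k + 1 : Nat) : Int), [], []) := by
        rw [pvStep]
        rw [if_neg hc]
        rw [if_neg (by norm_num), if_neg (by norm_num), if_pos rfl]
        rw [if_pos (by rw [hget, hceq])]
        rw [if_neg (by intro hh; omega)]
        push_cast; rfl
      rw [List.foldl_cons, hstep]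
      exact pv_pre_run r hr (k + 1) (by omega) (by omega) hnp' acc
    · have hstep : pvStep (acc, 1, (k : Int), [], []) c = (acc, 3, (k : Int), [], []) := by
        rw [pvStep]
        rw [if_neg hc]
        rw [if_neg (by norm_num), if_neg (by norm_num), if_pos rfl]
        rw [if_neg (by rw [hget]; simp; exact hceq)]
      rw [List.foldl_cons, hstep, pv_dead_run r hr acc _ [] []]
      simp

def pvBLine (line : List Char) : Option String :=
  let ds := line.dropWhile pvWs
  if pvPrefix.isPrefixOf ds then
    let p := pvRstrip ((ds.drop 15).dropWhile pvWs)
    if p ≠ [] then some (String.ofList p) else none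
  else none

theorem pvStep_nl (res : List String) (mode pos : Int) (buf pend : List Char) :
    pvStep (res, mode, pos, buf, pend) '\n'
      = ((if mode = 2 ∧ buf ≠ [] then res ++ [String.ofList buf] else res), 0, 0, [], []) := by
  rw [pvStep, if_pos rfl]

-- M8: one full line plus its newline
theorem pv_line_run (line : List Char) (hnl : '\n' ∉ line) (acc : List String) :
    List.foldl pvStep (acc, 0, 0, [], []) (line ++ ['\n'])
      = (acc ++ (pvBLine line).toList, 0, 0, [], []) := by
  have hsplit : line = line.takeWhile pvWs ++ line.dropWhile pvWs :=
    (List.takeWhile_append_dropWhile).symm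
  have hws : ∀ c ∈ line.takeWhile pvWs, pvWs c = true := fun c hc => List.mem_takeWhile_imp hc
  have hnl_ds : '\n' ∉ line.dropWhile pvWs := fun hx =>
    hnl ((List.dropWhile_sublist _).subset hx)
  have h0 : List.foldl pvStep (acc, 0, 0, [], []) (line ++ ['\n'])
      = List.foldl pvStep (acc, 0, 0, [], []) (line.dropWhile pvWs ++ ['\n']) := by
    conv_lhs => rw [hsplit, List.append_assoc, List.foldl_append, pv_ws_run _ hws acc]
  rw [h0]
  simp only [pvBLine]
  cases hds : line.dropWhile pvWs with
  | nil =>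
    rw [List.nil_append, List.foldl_cons, List.foldl_nil, pvStep_nl]
    rw [if_neg (by simp)]
    rw [if_neg (by decide)]
    simp
  | cons d t =>
    rw [hds] at hnl_ds
    have hd_nl : d ≠ '\n' := fun h => hnl_ds (h ▸ List.mem_cons_self)
    have ht_nl : '\n' ∉ t := fun hx => hnl_ds (List.mem_cons_of_mem _ hx)
    have hd_ws : pvWs d = false := by
      have := List.head?_dropWhile_not pvWs line
      rw [hds] at this; simpa using this
    by_cases hpre : pvPrefix <+: d :: t
    · obtain ⟨tail, htail⟩ := hpre
      have htail_nl : '\n' ∉ tail := fun hx => hnl_ds (htail ▸ (List.mem_append.mpr (Or.inr hx)))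
      rw [← htail, List.append_assoc, List.foldl_append, pv_prefix_run]
      rw [List.foldl_append, pv_path_run tail htail_nl acc 15 [] []]
      rw [pvPathRun_fst_nil tail [] (by simp)]
      rw [List.foldl_cons, List.foldl_nil, pvStep_nl]
      rw [if_pos (List.isPrefixOf_iff_prefix.mpr (List.prefix_append _ _))]
      have hdrop : (pvPrefix ++ tail).drop 15 = tail := by
        have := List.drop_left (l₁ := pvPrefix) (l₂ := tail)
        rwa [pvPrefix_length] at this
      rw [hdrop]
      by_cases hB : pvRstrip (tail.dropWhile pvWs) = [] <;> simp [hB]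
    · have hpre' : pvPrefix.isPrefixOf (d :: t) = false := by
        rw [Bool.eq_false_iff]
        intro h; exact hpre (List.isPrefixOf_iff_prefix.mp h)
      rw [if_neg (by rw [hpre']; simp)]
      by_cases hW : d = 'W'
      · subst hW
        have hstep : pvStep (acc, 0, 0, [], []) 'W' = (acc, 1, 1, [], []) := by
          rw [pvStep, if_neg (by decide), if_neg (by norm_num), if_pos rfl,
              if_neg (by rw [hd_ws]; simp), if_pos (by decide)]
        rw [List.cons_append, List.foldl_cons, hstep]
        have hnp : ¬ (pvPrefix.drop 1 <+: t) := by
          intro hp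
          exact hpre (by
            rw [show pvPrefix = 'W' :: pvPrefix.drop 1 from by decide]
            exact List.cons_prefix_cons.mpr ⟨rfl, hp⟩)
        have hrun := pv_pre_run t ht_nl 1 (by omega) (by omega) hnp acc
        rw [List.foldl_append]
        set S := List.foldl pvStep (acc, 1, (1 : Int), [], []) t with hS
        have hcast : ((1 : Nat) : Int) = (1 : Int) := rfl
        rw [hcast] at hrun
        rw [show S = (S.1, S.2.1, S.2.2.1, S.2.2.2.1, S.2.2.2.2) from rfl]
        rw [List.foldl_cons, List.foldl_nil, pvStep_nl]
        rw [if_neg (by intro hh; exact hrun.2 hh.1)]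
        rw [hrun.1]
        simp
      · have hstep : pvStep (acc, 0, 0, [], []) d = (acc, 3, 0, [], []) := by
          rw [pvStep, if_neg hd_nl, if_neg (by norm_num), if_pos rfl,
              if_neg (by rw [hd_ws]; simp)]
          rw [if_neg (by
            rw [show PySem.List.pyGet? pvPrefix 0 = some 'W' from by decide]
            simp; exact fun h => hW h.symm)]
        rw [List.cons_append, List.foldl_cons, hstep]
        rw [List.foldl_append, pv_dead_run t ht_nl acc 0 [] []]
        rw [List.foldl_cons, List.foldl_nil, pvStep_nl]
        rw [if_neg (by norm_num)]
        simp

theorem pvChar_eq_iff (c d : Char) : c = d ↔ c.toNat = d.toNat :=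
  ⟨fun h => h ▸ rfl, fun h => Char.ext (UInt32.toNat_inj.mp h)⟩
theorem pv_isspace_eq (c : Char) (hdom : pvDomChar c = true) (hnl : c ≠ '\n') :
    PySem.Chars.isspace c = pvWs c := by
  have hn : c.toNat ≠ 10 := fun h => hnl ((pvChar_eq_iff c '\n').mpr h)
  have hd := hdom
  simp only [pvDomChar, Bool.or_eq_true, Bool.and_eq_true, decide_eq_true_eq, beq_iff_eq] at hd
  rw [Bool.eq_iff_iff]
  simp only [PySem.Chars.isspace, pvWs, Bool.or_eq_true, Bool.and_eq_true, decide_eq_true_eq,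
    beq_iff_eq, pvChar_eq_iff]
  simp only [show (' ').toNat = 32 from rfl, show ('\t').toNat = 9 from rfl,
    show ('\r').toNat = 13 from rfl]
  omega

def pvALine (line : List Char) : Option String :=
  let l := PySem.Chars.strip line
  if PySem.Chars.startswith l "Would reformat:".toList then
    let path := PySem.Chars.strip (pvRemoveprefix l "Would reformat:".toList)
    if path ≠ [] then some (String.ofList path) else none
  else none

theorem pv_strip_eq (t : List Char) (h : ∀ c ∈ t, pvDomChar c = true ∧ c ≠ '\n') :
    PySem.Chars.strip t = pvRstrip (t.dropWhile pvWs) := by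
  have h1 : t.dropWhile PySem.Chars.isspace = t.dropWhile pvWs :=
    pv_dropWhile_congr (fun c hc => pv_isspace_eq c (h c hc).1 (h c hc).2)
  have hsub : ∀ c ∈ (t.dropWhile pvWs).reverse, pvDomChar c = true ∧ c ≠ '\n' := by
    intro c hc
    exact h c ((List.dropWhile_sublist _).subset (by simpa using hc))
  have h2 : (t.dropWhile pvWs).reverse.dropWhile PySem.Chars.isspace
      = (t.dropWhile pvWs).reverse.dropWhile pvWs :=
    pv_dropWhile_congr (fun c hc => pv_isspace_eq c (hsub c hc).1 (hsub c hc).2)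
  rw [PySem.Chars.strip, PySem.Chars.lstrip, PySem.Chars.rstrip, h1, h2, pvRstrip]

theorem pvALine_eq_pvBLine (line : List Char) (h : ∀ c ∈ line, pvDomChar c = true)
    (hnl : '\n' ∉ line) : pvALine line = pvBLine line := by
  have hmem : ∀ c ∈ line, pvDomChar c = true ∧ c ≠ '\n' :=
    fun c hc => ⟨h c hc, fun e => hnl (e ▸ hc)⟩
  have hstrip : PySem.Chars.strip line = pvRstrip (line.dropWhile pvWs) := pv_strip_eq line hmem
  simp only [pvALine, pvBLine, PySem.Chars.startswith, show "Would reformat:".toList = pvPrefix from rfl]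
  rw [hstrip]
  by_cases hpre : pvPrefix <+: line.dropWhile pvWs
  · obtain ⟨tail, htail⟩ := hpre
    have hrs : pvRstrip (line.dropWhile pvWs) = pvPrefix ++ pvRstrip tail := by
      rw [← htail, pvRstrip_prefix_append]
    have hcondA : pvPrefix.isPrefixOf (pvRstrip (line.dropWhile pvWs)) = true := by
      rw [hrs]; exact List.isPrefixOf_iff_prefix.mpr (List.prefix_append _ _)
    have hcondB : pvPrefix.isPrefixOf (line.dropWhile pvWs) = true := by
      rw [← htail]; exact List.isPrefixOf_iff_prefix.mpr (List.prefix_append _ _)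
    rw [if_pos hcondA, if_pos hcondB]
    have hrp : pvRemoveprefix (pvRstrip (line.dropWhile pvWs)) pvPrefix = pvRstrip tail := by
      rw [pvRemoveprefix, if_pos hcondA, hrs, pvPrefix_length]
      have := List.drop_left (l₁ := pvPrefix) (l₂ := pvRstrip tail)
      rwa [pvPrefix_length] at this
    rw [hrp]
    have htail_mem : ∀ c ∈ pvRstrip tail, pvDomChar c = true ∧ c ≠ '\n' := by
      intro c hc
      have h1 : c ∈ tail := (pvRstrip_suffix tail).subset hc
      have h2 : c ∈ line.dropWhile pvWs := by rw [← htail]; exact List.mem_append.mpr (Or.inr h1)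
      exact hmem c ((List.dropWhile_sublist _).subset h2)
    rw [pv_strip_eq _ htail_mem, pvRstrip_lstrip]
    have hdrop : (line.dropWhile pvWs).drop 15 = tail := by
      rw [← htail]
      have := List.drop_left (l₁ := pvPrefix) (l₂ := tail)
      rwa [pvPrefix_length] at this
    rw [hdrop]
  · have hA : pvPrefix.isPrefixOf (pvRstrip (line.dropWhile pvWs)) = false := by
      rw [Bool.eq_false_iff]
      intro hh
      exact hpre ((prefix_rstrip_iff _).mp (List.isPrefixOf_iff_prefix.mp hh))
    have hB : pvPrefix.isPrefixOf (line.dropWhile pvWs) = false := by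
      rw [Bool.eq_false_iff]
      intro hh
      exact hpre (List.isPrefixOf_iff_prefix.mp hh)
    rw [if_neg (by rw [hA]; simp), if_neg (by rw [hB]; simp)]

-- M9
theorem pv_glue_run : ∀ (pieces : List (List Char)), pieces ≠ [] → (∀ p ∈ pieces, '\n' ∉ p) →
    ∀ acc, List.foldl pvStep (acc, 0, 0, [], []) (pvGlue pieces)
      = (acc ++ pieces.filterMap pvBLine, 0, 0, [], [])
  | [], h, _, _ => absurd rfl h
  | [p], _, hp, acc => by
    rw [show pvGlue [p] = p ++ ['\n'] from rfl, pv_line_run p (hp p (by simp)) acc]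
    cases hb : pvBLine p <;> simp [List.filterMap, hb]
  | p :: q :: r, _, hp, acc => by
    rw [pvGlue_cons p (by simp), show p ++ '\n' :: pvGlue (q :: r) = (p ++ ['\n']) ++ pvGlue (q :: r) from by simp,
        List.foldl_append, pv_line_run p (hp p (by simp)) acc,
        pv_glue_run (q :: r) (by simp) (fun x hx => hp x (List.mem_cons_of_mem _ hx)) _]
    cases hb : pvBLine p <;> simp [List.filterMap_cons, hb]

theorem pvA_step_eq (reformatted : List String) (line : List Char) :
    (let l := PySem.Chars.strip line
     if PySem.Chars.startswith l "Would reformat:".toList then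
       let path := PySem.Chars.strip (pvRemoveprefix l "Would reformat:".toList)
       if path ≠ [] then reformatted ++ [String.ofList path] else reformatted
     else reformatted) = reformatted ++ (pvALine line).toList := by
  simp only [pvALine]
  split_ifs <;> simp

theorem pvA_foldl : ∀ (lines : List (List Char)) (acc : List String),
    lines.foldl
      (fun reformatted line =>
        let l := PySem.Chars.strip line
        if PySem.Chars.startswith l "Would reformat:".toList then
          let path := PySem.Chars.strip (pvRemoveprefix l "Would reformat:".toList)
          if path ≠ [] then reformatted ++ [String.ofList path] else reformatted
        else reformatted) acc = acc ++ lines.filterMap pvALine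
  | [], acc => by simp
  | line :: rest, acc => by
    rw [List.foldl_cons]
    rw [show (let l := PySem.Chars.strip line
     if PySem.Chars.startswith l "Would reformat:".toList then
       let path := PySem.Chars.strip (pvRemoveprefix l "Would reformat:".toList)
       if path ≠ [] then acc ++ [String.ofList path] else acc
     else acc) = acc ++ (pvALine line).toList from pvA_step_eq acc line]
    rw [pvA_foldl rest _]
    cases hb : pvALine line <;> simp [List.filterMap_cons, hb]

theorem pv_main (output : String) (hdom : pvDomStr output = true) :
    parse_format_output_py output = parse_format_output_py_alt output := by
  have hchars : ∀ c ∈ output.toList, pvDomChar c = true := by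
    intro c hc
    exact List.all_eq_true.mp hdom c hc
  have hpieces := pvSplitNL_mem output.toList []
  rw [parse_format_output_py, show "\n".toList = ['\n'] from rfl, pvSplitOn_eq, pvA_foldl]
  rw [parse_format_output_py_alt,
      show output.toList ++ ['\n'] = [] ++ output.toList ++ ['\n'] from by simp,
      ← pvGlue_splitNL output.toList [],
      pv_glue_run _ (pvSplitNL_ne_nil _ _)
        (by
          intro p hp hx
          rcases hpieces p hp '\n' hx with h | ⟨_, h2⟩
          · simp at h
          · exact h2 rfl) []]
  simp only [List.nil_append]
  apply List.filterMap_congr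
  intro p hp
  apply pvALine_eq_pvBLine
  · intro c hc
    rcases hpieces p hp c hc with h | ⟨h1, _⟩
    · simp at h
    · exact hchars c h1
  · intro hx
    rcases hpieces p hp '\n' hx with h | ⟨_, h2⟩
    · simp at h
    · exact h2 rfl

-- ===== VERDICT (by name: the statement is the Claim_ definition above) =====
theorem parse_format_output_py_spec : Claim_equal_parse_format_output_py := by
  intro output hdom
  unfold Spec_parse_format_output_py
  exact pv_main output hdom
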